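-- pv_equiv track=rewrite | github.com/Deplim/eui_ar | 혼자 푼 문제/불량 사용자.py | check
-- ===== SOURCE A (Python) =====
-- def check(a, b):
--     for i in b:
--         check = 1
--         for j in range(len(i)):
--             if check2(a[j], i[j]) == 0:
--                 check = 0
--                 break;
--         if check == 1:
--             return 1
--
--     return 0
--
-- def check2(a, b):
--     if len(a) != len(b):
--         return 0
--
--     for i in range(len(b)):
--         if b[i] == '*':
--             continue
--         if a[i] != b[i]:
--             return 0
--     return 1
-- ===== SOURCE B (Python) =====
-- def check(a, b):
--     # Column-wise sweep: keep the surviving candidate rows and filter them all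
--     # at once per position j; a survivor whose length is reached fully matched.
--     def fits(u, p):
--         return len(u) == len(p) and all(c == '*' or c == d for d, c in zip(u, p))
--     survivors = list(b)
--     for j in range(max(map(len, b), default=0) + 1):
--         if not survivors:
--             return 0
--         if any(len(r) == j for r in survivors):
--             return 1
--         survivors = [r for r in survivors
--                      if j < len(a) and j < len(r) and fits(a[j], r[j])]
--     return 0
-- ===== Notes on version B (the rewrite author's own statement) =====
-- stated objective: alternative
-- what changed: A checks candidate rows one by one, scanning each row's positions with a flag/break helper; B sweeps position index j column-wise over the whole candidate set at once, filtering the surviving rows per column and answering 1 as soon as a survivor's length is reached.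
import Mathlib
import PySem

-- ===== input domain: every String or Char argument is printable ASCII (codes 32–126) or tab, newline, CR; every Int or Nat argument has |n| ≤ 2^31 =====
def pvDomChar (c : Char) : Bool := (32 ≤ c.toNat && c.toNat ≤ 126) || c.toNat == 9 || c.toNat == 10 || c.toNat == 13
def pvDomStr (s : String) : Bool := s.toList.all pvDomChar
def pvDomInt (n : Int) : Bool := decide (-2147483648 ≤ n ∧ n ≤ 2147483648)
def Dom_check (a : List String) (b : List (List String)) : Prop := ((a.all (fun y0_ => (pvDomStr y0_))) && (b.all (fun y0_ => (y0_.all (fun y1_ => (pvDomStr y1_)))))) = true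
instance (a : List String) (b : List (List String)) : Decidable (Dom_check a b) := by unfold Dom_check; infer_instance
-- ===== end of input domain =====

-- B replaces A's row-by-row scan by a column-wise sweep that filters the surviving
-- candidate rows per position (alternative decomposition; no speed claim).

-- ===== PORT A =====
-- inner loop of check2: index i over range(len(b)); lengths of s,t are equal at every
-- call site (check2 returns 0 first otherwise), so getD with a dummy default is exact here
def check2Go (s t : List Char) (i : Nat) : Int :=
  if _h : i < t.length then
    if t.getD i ' ' == '*' then check2Go s t (i + 1)
    else if s.getD i ' ' != t.getD i ' ' then 0
    else check2Go s t (i + 1)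
  else 1
  termination_by t.length - i

-- helper check2(a, b) of A; string length/indexing done on toList (exact)
def check2 (s t : String) : Int :=
  if s.toList.length ≠ t.toList.length then 0 else check2Go s.toList t.toList 0

-- inner loop of check over j in range(len(i)); a[j] may raise IndexError → none
def rowLoop (a r : List String) (j : Nat) : Option Bool :=
  if _h : j < r.length then
    match PySem.List.pyGet? a (j : Int) with
    | none => none
    | some s => if check2 s (r.getD j "") = 0 then some false else rowLoop a r (j + 1)
  else some true
  termination_by r.length - j

-- outer loop of check; none = the IndexError path (excluded by Pre_check)
def checkAux (a : List String) : List (List String) → Option Int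
  | [] => some 0
  | r :: rest =>
    match rowLoop a r 0 with
    | none => none
    | some true => some 1
    | some false => checkAux a rest

def check (a : List String) (b : List (List String)) : Int := (checkAux a b).getD 0

-- ===== PORT B =====
-- fits(u, p) of Source B: equal length and every zipped pair (d from u, c from p) has c = '*' or c = d
def fitsB (u p : String) : Bool :=
  (u.toList.length == p.toList.length) &&
    ((u.toList.zip p.toList).all fun dc => dc.2 == '*' || dc.2 == dc.1)

-- the `for j in range(bound)` loop of Source B: fuel = remaining iterations, j = column index
def colLoop (a : List String) (survivors : List (List String)) (j : Nat) : Nat → Int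
  | 0 => 0
  | n + 1 =>
    if survivors.isEmpty then 0
    else if survivors.any (fun r => r.length == j) then 1
    else colLoop a
      (survivors.filter fun r =>
        decide (j < a.length) && decide (j < r.length) && fitsB (a.getD j "") (r.getD j ""))
      (j + 1) n

-- bound = max(map(len, b), default=0) + 1
def check_alt (a : List String) (b : List (List String)) : Int :=
  colLoop a b 0 ((b.map List.length).foldl max 0 + 1)

-- ===== PRECONDITION & SPEC =====
-- matchB u p: check2 would return 1 (equal lengths, '*' wildcard per position)
def matchB (u p : String) : Bool :=
  (u.toList.length == p.toList.length) &&
    (List.range p.toList.length).all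
      (fun k => p.toList.getD k ' ' == '*' || u.toList.getD k ' ' == p.toList.getD k ' ')

-- row r is longer than a and its first a.length positions all match: scanning it raises IndexError
def prefixBadB (a r : List String) : Bool :=
  decide (a.length < r.length) && (List.range a.length).all (fun j => matchB (a.getD j "") (r.getD j ""))

-- row r fully matches a (A returns 1 on reaching it)
def fullMatchB (a r : List String) : Bool :=
  decide (r.length ≤ a.length) && (List.range r.length).all (fun j => matchB (a.getD j "") (r.getD j ""))

-- Pre_check excludes exactly the inputs on which A raises IndexError (a[j] with j ≥ len(a)):
-- some row is longer than a with its first len(a) positions matching, and no earlier row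
-- settles the answer (fully matches or itself raises)
def Pre_check (a : List String) (b : List (List String)) : Prop :=
  ¬ ∃ k < b.length, prefixBadB a (b.getD k []) = true ∧
      ∀ k' < k, fullMatchB a (b.getD k' []) = false ∧ prefixBadB a (b.getD k' []) = false
instance (a : List String) (b : List (List String)) : Decidable (Pre_check a b) := by
  unfold Pre_check; infer_instance

def pvWitness_check : List String × List (List String) := (["ab"], [["x*"], ["a*"]])

def Spec_check (a : List String) (b : List (List String)) (out : Int) : Prop := out = check_alt a b
instance (a : List String) (b : List (List String)) (out : Int) : Decidable (Spec_check a b out) := by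
  unfold Spec_check; infer_instance

-- ===== CLAIM (what is proved, stated in full; the proofs are below) =====
def Claim_equal_check : Prop := ∀ (a : List String) (b : List (List String)), Dom_check a b → Pre_check a b → Spec_check a b (check a b)

-- ===== LEMMAS AND PROOFS =====

lemma check2Go_eq (s t : List Char) (i : Nat) :
    check2Go s t i =
      if (∀ k < t.length, i ≤ k → (t.getD k ' ' = '*' ∨ s.getD k ' ' = t.getD k ' ')) then 1 else 0 := by
  fun_induction check2Go s t i with
  | case1 i h hstar ih =>
    rw [ih]
    simp only [beq_iff_eq] at hstar
    congr 1
    apply propext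
    constructor
    · intro hp k hk hik
      rcases Nat.eq_or_lt_of_le hik with rfl | hlt
      · exact Or.inl hstar
      · exact hp k hk hlt
    · intro hp k hk hik; exact hp k hk (by omega)
  | case2 i h hstar hne =>
    rw [if_neg]
    simp only [beq_iff_eq] at hstar
    simp only [bne_iff_ne, ne_eq] at hne
    intro hp
    rcases hp i h le_rfl with h1 | h2
    · exact hstar h1
    · exact hne h2
  | case3 i h hstar hne ih =>
    rw [ih]
    simp only [beq_iff_eq] at hstar
    simp only [bne_iff_ne, ne_eq, not_not] at hne
    congr 1
    apply propext
    constructor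
    · intro hp k hk hik
      rcases Nat.eq_or_lt_of_le hik with rfl | hlt
      · exact Or.inr hne
      · exact hp k hk hlt
    · intro hp k hk hik; exact hp k hk (by omega)
  | case4 i h =>
    rw [if_pos]
    intro k hk hik; omega

lemma matchB_iff (u p : String) :
    matchB u p = true ↔ (u.toList.length = p.toList.length ∧
      ∀ k < p.toList.length, p.toList.getD k ' ' = '*' ∨ u.toList.getD k ' ' = p.toList.getD k ' ') := by
  simp [matchB, List.all_eq_true]

lemma check2_eq (s t : String) : check2 s t = if matchB s t then 1 else 0 := by
  unfold check2
  by_cases hl : s.toList.length = t.toList.length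
  · rw [if_neg (by omega), check2Go_eq]
    by_cases hm : matchB s t = true
    · rw [if_pos, hm, if_pos rfl]
      intro k hk _
      exact ((matchB_iff s t).mp hm).2 k hk
    · rw [if_neg, if_neg (by simpa using hm)]
      intro hp
      exact hm ((matchB_iff s t).mpr ⟨hl, fun k hk => hp k hk (Nat.zero_le k)⟩)
  · rw [if_pos hl]
    have hf : matchB s t = false := by
      rcases Bool.eq_false_or_eq_true (matchB s t) with h | h
      · exact absurd ((matchB_iff s t).mp h).1 hl
      · exact h
    rw [hf, if_neg (by simp)]

lemma fitsB_eq (u p : String) : fitsB u p = matchB u p := by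
  rcases Bool.eq_false_or_eq_true (matchB u p) with h | h <;> rw [h]
  swap
  · rw [Bool.eq_false_iff]
    intro hf
    apply absurd _ (Bool.eq_false_iff.mp h)
    simp only [fitsB, Bool.and_eq_true, List.all_eq_true, beq_iff_eq] at hf
    obtain ⟨hl, hz⟩ := hf
    apply (matchB_iff u p).mpr
    refine ⟨hl, fun k hk => ?_⟩
    have hku : k < u.toList.length := by rw [hl]; exact hk
    have hmem : (u.toList[k], p.toList[k]) ∈ u.toList.zip p.toList := by
      apply List.mem_iff_getElem.mpr
      refine ⟨k, by rw [List.length_zip]; omega, by simp⟩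
    have := hz _ hmem
    simp only [Bool.or_eq_true, beq_iff_eq] at this
    simp only [List.getD_eq_getElem?_getD, List.getElem?_eq_getElem hk,
      List.getElem?_eq_getElem hku, Option.getD_some]
    rcases this with h1 | h1
    · exact Or.inl h1
    · exact Or.inr h1.symm
  · obtain ⟨hl, hall⟩ := (matchB_iff u p).mp h
    simp only [fitsB, Bool.and_eq_true, List.all_eq_true, beq_iff_eq]
    refine ⟨hl, fun dc hdc => ?_⟩
    obtain ⟨k, hk, hget⟩ := List.mem_iff_getElem.mp hdc
    rw [List.length_zip] at hk
    have hku : k < u.toList.length := by omega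
    have hkp : k < p.toList.length := by omega
    have := hall k hkp
    simp only [List.getD_eq_getElem?_getD, List.getElem?_eq_getElem hkp,
      List.getElem?_eq_getElem hku, Option.getD_some] at this
    rw [List.getElem_zip] at hget
    subst hget
    simp only [Bool.or_eq_true, beq_iff_eq]
    rcases this with h1 | h1
    · exact Or.inl h1
    · exact Or.inr h1.symm

-- rowB: A's per-row verdict ignoring the IndexError path (match over the zipped prefix)
def rowB (a r : List String) : Bool := (a.zip r).all fun up => fitsB up.1 up.2

lemma rowB_iff (a r : List String) :
    rowB a r = true ↔ ∀ k < min a.length r.length, matchB (a.getD k "") (r.getD k "") = true := by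
  simp only [rowB, List.all_eq_true]
  constructor
  · intro h k hk
    have hka : k < a.length := by omega
    have hkr : k < r.length := by omega
    have hmem : (a[k], r[k]) ∈ a.zip r := by
      apply List.mem_iff_getElem.mpr
      exact ⟨k, by simp [List.length_zip]; omega, by simp⟩
    have := h _ hmem
    rw [fitsB_eq] at this
    simpa [List.getD_eq_getElem?_getD, List.getElem?_eq_getElem hka,
      List.getElem?_eq_getElem hkr] using this
  · intro h up hmem
    obtain ⟨k, hk, hget⟩ := List.mem_iff_getElem.mp hmem
    rw [List.length_zip] at hk
    have hka : k < a.length := by omega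
    have hkr : k < r.length := by omega
    have := h k (by omega)
    rw [List.getElem_zip] at hget
    subst hget
    rw [fitsB_eq]
    simpa [List.getD_eq_getElem?_getD, List.getElem?_eq_getElem hka,
      List.getElem?_eq_getElem hkr] using this

lemma rowLoop_eq (a r : List String) (j : Nat) :
    rowLoop a r j =
      if (∀ k < r.length, j ≤ k → (k < a.length ∧ matchB (a.getD k "") (r.getD k "") = true)) then some true
      else if (∀ k < min a.length r.length, j ≤ k → matchB (a.getD k "") (r.getD k "") = true) then none
      else some false := by
  fun_induction rowLoop a r j with
  | case1 j h heq =>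
    have hj : a.length ≤ j := by
      by_contra hlt
      push_neg at hlt
      rw [PySem.List.pyGet?_natCast, List.getElem?_eq_getElem hlt] at heq
      simp at heq
    rw [if_neg, if_pos]
    · intro k hk hjk; omega
    · intro hp
      obtain ⟨hka, _⟩ := hp j h le_rfl
      omega
  | case2 j h s heq hc0 =>
    have hja : j < a.length := by
      by_contra hge
      push_neg at hge
      rw [PySem.List.pyGet?_natCast, List.getElem?_eq_none_iff.mpr hge] at heq
      simp at heq
    have hs : a.getD j "" = s := by
      rw [PySem.List.pyGet?_natCast, List.getElem?_eq_getElem hja] at heq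
      simp only [Option.some.injEq] at heq
      simp [List.getD_eq_getElem?_getD, List.getElem?_eq_getElem hja, heq]
    have hm : matchB (a.getD j "") (r.getD j "") = false := by
      rw [hs]
      rcases Bool.eq_false_or_eq_true (matchB s (r.getD j "")) with ht | hf
      · rw [check2_eq, ht, if_pos rfl] at hc0; exact absurd hc0 (by norm_num)
      · exact hf
    rw [if_neg, if_neg]
    · intro hp
      have := hp j (by omega) le_rfl
      rw [hm] at this
      exact Bool.noConfusion this
    · intro hp
      have := (hp j h le_rfl).2
      rw [hm] at this
      exact Bool.noConfusion this
  | case3 j h s heq hc0 ih =>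
    have hja : j < a.length := by
      by_contra hge
      push_neg at hge
      rw [PySem.List.pyGet?_natCast, List.getElem?_eq_none_iff.mpr hge] at heq
      simp at heq
    have hs : a.getD j "" = s := by
      rw [PySem.List.pyGet?_natCast, List.getElem?_eq_getElem hja] at heq
      simp only [Option.some.injEq] at heq
      simp [List.getD_eq_getElem?_getD, List.getElem?_eq_getElem hja, heq]
    have hm : matchB (a.getD j "") (r.getD j "") = true := by
      rw [hs]
      rcases Bool.eq_false_or_eq_true (matchB s (r.getD j "")) with ht | hf
      · exact ht
      · rw [check2_eq, hf, if_neg (by simp)] at hc0; exact absurd rfl hc0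
    rw [ih]
    have e1 : (∀ k < r.length, j + 1 ≤ k → (k < a.length ∧ matchB (a.getD k "") (r.getD k "") = true))
        ↔ (∀ k < r.length, j ≤ k → (k < a.length ∧ matchB (a.getD k "") (r.getD k "") = true)) := by
      constructor
      · intro hp k hk hjk
        rcases Nat.eq_or_lt_of_le hjk with rfl | hlt
        · exact ⟨hja, hm⟩
        · exact hp k hk hlt
      · intro hp k hk hjk; exact hp k hk (by omega)
    have e2 : (∀ k < min a.length r.length, j + 1 ≤ k → matchB (a.getD k "") (r.getD k "") = true)
        ↔ (∀ k < min a.length r.length, j ≤ k → matchB (a.getD k "") (r.getD k "") = true) := by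
      constructor
      · intro hp k hk hjk
        rcases Nat.eq_or_lt_of_le hjk with rfl | hlt
        · exact hm
        · exact hp k hk hlt
      · intro hp k hk hjk; exact hp k hk (by omega)
    rw [if_congr e1 rfl (if_congr e2 rfl rfl)]
  | case4 j h =>
    rw [if_pos]
    intro k hk hjk; omega

lemma checkAux_eq (a : List String) (b : List (List String)) (h : Pre_check a b) :
    checkAux a b = some (if b.any (rowB a) then 1 else 0) := by
  induction b with
  | nil => simp [checkAux]
  | cons r rest ih =>
    rw [checkAux, rowLoop_eq]
    by_cases h1 : (∀ k < r.length, 0 ≤ k → (k < a.length ∧ matchB (a.getD k "") (r.getD k "") = true))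
    · rw [if_pos h1]
      have hr : rowB a r = true := by
        rw [rowB_iff]
        intro k hk
        exact (h1 k (by omega) (Nat.zero_le k)).2
      simp [List.any_cons, hr]
    · rw [if_neg h1]
      by_cases h2 : (∀ k < min a.length r.length, 0 ≤ k → matchB (a.getD k "") (r.getD k "") = true)
      · exfalso
        have hlt : a.length < r.length := by
          by_contra hge
          push_neg at hge
          exact h1 (fun k hk _ => ⟨by omega, h2 k (by omega) (Nat.zero_le k)⟩)
        apply h
        refine ⟨0, by simp, ?_, by omega⟩
        simp only [List.getD_cons_zero, prefixBadB, Bool.and_eq_true, decide_eq_true_eq,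
          List.all_eq_true, List.mem_range]
        exact ⟨hlt, fun k hk => h2 k (by omega) (Nat.zero_le k)⟩
      · rw [if_neg h2]
        have hr : rowB a r = false := by
          rcases Bool.eq_false_or_eq_true (rowB a r) with ht | hf
          · exact absurd (fun k hk _ => (rowB_iff a r).mp ht k hk) h2
          · exact hf
        have hpre : Pre_check a rest := by
          intro hex
          obtain ⟨k, hk, hbad, hall⟩ := hex
          apply h
          refine ⟨k + 1, by simpa using hk, by simpa using hbad, ?_⟩
          intro k' hk'
          cases k' with
          | zero =>
            simp only [List.getD_cons_zero]
            constructor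
            · rcases Bool.eq_false_or_eq_true (fullMatchB a r) with ht | hf
              swap
              · exact hf
              · exfalso
                simp only [fullMatchB, Bool.and_eq_true, decide_eq_true_eq,
                  List.all_eq_true, List.mem_range] at ht
                exact h1 (fun k hk _ => ⟨by omega, ht.2 k hk⟩)
            · rcases Bool.eq_false_or_eq_true (prefixBadB a r) with ht | hf
              swap
              · exact hf
              · exfalso
                simp only [prefixBadB, Bool.and_eq_true, decide_eq_true_eq,
                  List.all_eq_true, List.mem_range] at ht
                exact h2 (fun k hk _ => ht.2 k (by omega))
          | succ k'' =>
            simp only [List.getD_cons_succ]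
            exact hall k'' (by omega)
        rw [ih hpre]
        simp [List.any_cons, hr]

-- matchFromB a j r: r still matches from column j on (every k ≥ j is in range of a and fits)
def matchFromB (a : List String) (j : Nat) (r : List String) : Bool :=
  (List.range r.length).all
    (fun k => decide (k < j) || (decide (k < a.length) && fitsB (a.getD k "") (r.getD k "")))

lemma matchFromB_iff (a : List String) (j : Nat) (r : List String) :
    matchFromB a j r = true ↔
      ∀ k < r.length, j ≤ k → (k < a.length ∧ matchB (a.getD k "") (r.getD k "") = true) := by
  simp only [matchFromB, List.all_eq_true, List.mem_range, Bool.or_eq_true, Bool.and_eq_true,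
    decide_eq_true_eq, fitsB_eq]
  constructor
  · intro h k hk hjk
    rcases h k hk with h1 | h2
    · omega
    · exact h2
  · intro h k hk
    by_cases hkj : k < j
    · exact Or.inl hkj
    · exact Or.inr (h k hk (by omega))

lemma foldl_max_init_le (l : List Nat) (m : Nat) : m ≤ l.foldl max m := by
  induction l generalizing m with
  | nil => exact le_rfl
  | cons h t ih => exact le_trans (Nat.le_max_left m h) (ih (max m h))

lemma mem_le_foldl_max (l : List Nat) (m x : Nat) (hx : x ∈ l) : x ≤ l.foldl max m := by
  induction l generalizing m with
  | nil => cases hx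
  | cons h t ih =>
    rcases List.mem_cons.mp hx with rfl | hx'
    · exact le_trans (Nat.le_max_right m x) (foldl_max_init_le t (max m x))
    · exact ih _ hx'

lemma colLoop_eq (a : List String) (n : Nat) : ∀ (j : Nat) (s : List (List String)),
    (∀ r ∈ s, j ≤ r.length) →
    (∀ r ∈ s, matchFromB a j r = true → r.length < j + n) →
    colLoop a s j n = if s.any (matchFromB a j) then 1 else 0 := by
  induction n with
  | zero =>
    intro j s h1 h2
    have hany : s.any (matchFromB a j) = false := by
      rw [List.any_eq_false]
      intro r hr hm
      have := h2 r hr hm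
      have := h1 r hr
      omega
    simp [colLoop, hany]
  | succ n ih =>
    intro j s h1 h2
    rw [colLoop]
    by_cases hs : s.isEmpty
    · rw [if_pos hs]
      rw [List.isEmpty_iff] at hs
      subst hs
      simp
    · rw [if_neg hs]
      by_cases hdone : s.any (fun r => r.length == j)
      · rw [if_pos hdone]
        obtain ⟨r, hr, hlen⟩ := List.any_eq_true.mp hdone
        simp only [beq_iff_eq] at hlen
        have hm : matchFromB a j r = true := by
          rw [matchFromB_iff]
          intro k hk hjk; omega
        rw [if_pos (List.any_eq_true.mpr ⟨r, hr, hm⟩)]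
      · rw [if_neg hdone]
        have hnolen : ∀ r ∈ s, r.length ≠ j := by
          intro r hr he
          exact hdone (List.any_eq_true.mpr ⟨r, hr, by simp [he]⟩)
        set f : List String → Bool := fun r =>
          decide (j < a.length) && decide (j < r.length) && fitsB (a.getD j "") (r.getD j "") with hf
        have hmem : ∀ r ∈ s.filter f, r ∈ s ∧ f r = true := by
          intro r hr; exact ⟨List.mem_of_mem_filter hr, List.of_mem_filter hr⟩
        have hstep : ∀ r ∈ s.filter f, matchFromB a (j + 1) r = true → matchFromB a j r = true := by
          intro r hr hm
          obtain ⟨hrs, hfr⟩ := hmem r hr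
          simp only [hf, Bool.and_eq_true, decide_eq_true_eq, fitsB_eq] at hfr
          rw [matchFromB_iff] at hm ⊢
          intro k hk hjk
          rcases Nat.eq_or_lt_of_le hjk with rfl | hlt
          · exact ⟨hfr.1.1, hfr.2⟩
          · exact hm k hk hlt
        have h1' : ∀ r ∈ s.filter f, j + 1 ≤ r.length := by
          intro r hr
          have := (hmem r hr).2
          simp only [hf, Bool.and_eq_true, decide_eq_true_eq] at this
          omega
        have h2' : ∀ r ∈ s.filter f, matchFromB a (j + 1) r = true → r.length < j + 1 + n := by
          intro r hr hm
          have := h2 r (hmem r hr).1 (hstep r hr hm)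
          omega
        rw [ih (j + 1) (s.filter f) h1' h2']
        have hany : (s.filter f).any (matchFromB a (j + 1)) = s.any (matchFromB a j) := by
          rcases Bool.eq_false_or_eq_true (s.any (matchFromB a j)) with htrue | hfalse
          · -- some r in s matches from j: it survives the filter and matches from j+1
            rw [htrue]
            obtain ⟨r, hr, hm⟩ := List.any_eq_true.mp htrue
            have hjr : j < r.length := by
              have := h1 r hr
              have := hnolen r hr
              omega
            rw [matchFromB_iff] at hm
            obtain ⟨hja, hfit⟩ := hm j hjr le_rfl
            have hfr : f r = true := by
              simp only [hf, Bool.and_eq_true, decide_eq_true_eq, fitsB_eq]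
              exact ⟨⟨hja, hjr⟩, hfit⟩
            have hm' : matchFromB a (j + 1) r = true := by
              rw [matchFromB_iff]
              intro k hk hjk
              exact hm k hk (by omega)
            exact List.any_eq_true.mpr ⟨r, List.mem_filter.mpr ⟨hr, hfr⟩, hm'⟩
          · rw [hfalse, List.any_eq_false]
            rw [List.any_eq_false] at hfalse
            intro r hr hm
            exact hfalse r (hmem r hr).1 (hstep r hr hm)
        rw [hany]

lemma matchFrom0_eq_full (a r : List String) : matchFromB a 0 r = fullMatchB a r := by
  rcases Bool.eq_false_or_eq_true (fullMatchB a r) with h | h <;> rw [h]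
  · simp only [fullMatchB, Bool.and_eq_true, decide_eq_true_eq, List.all_eq_true,
      List.mem_range] at h
    rw [matchFromB_iff]
    intro k hk _
    exact ⟨by omega, h.2 k hk⟩
  · rw [Bool.eq_false_iff]
    intro hm
    apply absurd _ (Bool.eq_false_iff.mp h)
    rw [matchFromB_iff] at hm
    simp only [fullMatchB, Bool.and_eq_true, decide_eq_true_eq, List.all_eq_true, List.mem_range]
    constructor
    · rcases Nat.eq_zero_or_pos r.length with h0 | hpos
      · omega
      · have := (hm (r.length - 1) (by omega) (by omega)).1
        omega
    · intro k hk
      exact (hm k hk (Nat.zero_le k)).2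

lemma rowB_cases (a r : List String) (h : rowB a r = true) :
    fullMatchB a r = true ∨ prefixBadB a r = true := by
  rw [rowB_iff] at h
  by_cases hl : r.length ≤ a.length
  · left
    simp only [fullMatchB, Bool.and_eq_true, decide_eq_true_eq, List.all_eq_true, List.mem_range]
    exact ⟨hl, fun k hk => h k (by omega)⟩
  · right
    simp only [prefixBadB, Bool.and_eq_true, decide_eq_true_eq, List.all_eq_true, List.mem_range]
    exact ⟨by omega, fun k hk => h k (by omega)⟩

lemma full_rowB (a r : List String) (h : fullMatchB a r = true) : rowB a r = true := by
  simp only [fullMatchB, Bool.and_eq_true, decide_eq_true_eq, List.all_eq_true,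
    List.mem_range] at h
  rw [rowB_iff]
  intro k hk
  exact h.2 k (by omega)

lemma any_full_eq_any_rowB (a : List String) (b : List (List String)) (hpre : Pre_check a b) :
    b.any (fullMatchB a) = b.any (rowB a) := by
  rcases Bool.eq_false_or_eq_true (b.any (rowB a)) with h | h <;> rw [h]
  · obtain ⟨r, hr, hrow⟩ := List.any_eq_true.mp h
    rcases rowB_cases a r hrow with hfull | hbad
    · exact List.any_eq_true.mpr ⟨r, hr, hfull⟩
    · -- a prefix-bad row exists; by Pre_check the minimal one has an earlier full match
      obtain ⟨i, hi, hget⟩ := List.mem_iff_getElem.mp hr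
      have hP : ∃ k, k < b.length ∧ prefixBadB a (b.getD k []) = true := by
        refine ⟨i, hi, ?_⟩
        rwa [List.getD_eq_getElem?_getD, List.getElem?_eq_getElem hi, Option.getD_some, hget]
      obtain ⟨hk0len, hk0bad⟩ := Nat.find_spec hP
      unfold Pre_check at hpre
      push_neg at hpre
      obtain ⟨k', hk', hne⟩ := hpre (Nat.find hP) hk0len hk0bad
      have hk'bad : prefixBadB a (b.getD k' []) = false := by
        rcases Bool.eq_false_or_eq_true (prefixBadB a (b.getD k' [])) with ht | hf
        · exact ((Nat.find_min hP hk') ⟨by omega, ht⟩).elim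
        · exact hf
      have hk'full : fullMatchB a (b.getD k' []) = true := by
        rcases Bool.eq_false_or_eq_true (fullMatchB a (b.getD k' [])) with ht | hf
        · exact ht
        · exact absurd hk'bad (hne hf)
      have hmem : b.getD k' [] ∈ b := by
        have hk'len : k' < b.length := by omega
        rw [List.getD_eq_getElem?_getD, List.getElem?_eq_getElem hk'len, Option.getD_some]
        exact List.getElem_mem hk'len
      exact List.any_eq_true.mpr ⟨_, hmem, hk'full⟩
  · rw [List.any_eq_false] at h ⊢
    intro r hr hfull
    exact h r hr (full_rowB a r hfull)

-- ===== VERDICT (by name: the statement is the Claim_ definition above) =====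
theorem check_spec : Claim_equal_check := by
  intro a b _ hpre
  unfold Spec_check check check_alt
  rw [checkAux_eq a b hpre]
  rw [colLoop_eq a _ 0 b (fun r _ => Nat.zero_le _) ?bound]
  case bound =>
    intro r hr _
    have : r.length ≤ (b.map List.length).foldl max 0 :=
      mem_le_foldl_max _ 0 _ (List.mem_map.mpr ⟨r, hr, rfl⟩)
    omega
  have : b.any (matchFromB a 0) = b.any (rowB a) := by
    rw [show matchFromB a 0 = fullMatchB a from funext (matchFrom0_eq_full a)]
    exact any_full_eq_any_rowB a b hpre
  rw [this]
  rfl
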